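-- pv_equiv track=rewrite | github.com/iwabuchiken/WS_Others_prog_D-7_2_2_VIRTUAL.20180918_143948 | Admin_Projects/mm/libs_mm/libfx.py | get_LO_PairOf_Time_StartEnd
-- ===== SOURCE A (Python) =====
-- def get_LO_PairOf_Time_StartEnd(str_Date) :
--
--     lo_Datetime = []
--
--     lo_Minutes = ["00", "30"]
--
--     hour_Start = 1
--     hour_End = 6
--
--     for i in range(hour_Start, hour_End + 1):
-- #     for i in range(1,7):
--
--         tmp_1 = str_Date + " " + "0" + str(i) + ":" + lo_Minutes[0]
--         tmp_2 = str_Date + " " + "0" + str(i) + ":" + lo_Minutes[1]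
--         tmp_3 = str_Date + " " + "0" + str(i + 1) + ":" + lo_Minutes[0]
--
-- #         residue = len(lo_Minutes) % 2
-- #
-- #         tmp += ":" + lo_Minutes[residue]
--
--
--
--         lo_Datetime.append((tmp_1, tmp_2))
--         lo_Datetime.append((tmp_2, tmp_3))
-- #         lo_Datetime.append((tmp_1, tmp_2))
-- #         lo_Datetime.append(tmp)
--
--     #/for i in range(1,7):
--
--     # return
--     return lo_Datetime
-- ===== SOURCE B (Python) =====
-- def get_LO_PairOf_Time_StartEnd(str_Date):
--     # Flat ordered list of timestamps 01:00, 01:30, ..., 06:30, 07:00, then pair adjacent ones.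
--     times = []
--     for h in range(1, 7):
--         times.append(str_Date + " 0" + str(h) + ":00")
--         times.append(str_Date + " 0" + str(h) + ":30")
--     times.append(str_Date + " 07:00")
--     return list(zip(times, times[1:]))
-- ===== Notes on version B (the rewrite author's own statement) =====
-- stated objective: simpler
-- what changed: B builds one flat ordered list of the 13 timestamp strings (01:00,01:30,...,06:30,07:00) and pairs adjacent entries with zip, instead of constructing three strings per hour and appending two pairs inside the loop.
import Mathlib
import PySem

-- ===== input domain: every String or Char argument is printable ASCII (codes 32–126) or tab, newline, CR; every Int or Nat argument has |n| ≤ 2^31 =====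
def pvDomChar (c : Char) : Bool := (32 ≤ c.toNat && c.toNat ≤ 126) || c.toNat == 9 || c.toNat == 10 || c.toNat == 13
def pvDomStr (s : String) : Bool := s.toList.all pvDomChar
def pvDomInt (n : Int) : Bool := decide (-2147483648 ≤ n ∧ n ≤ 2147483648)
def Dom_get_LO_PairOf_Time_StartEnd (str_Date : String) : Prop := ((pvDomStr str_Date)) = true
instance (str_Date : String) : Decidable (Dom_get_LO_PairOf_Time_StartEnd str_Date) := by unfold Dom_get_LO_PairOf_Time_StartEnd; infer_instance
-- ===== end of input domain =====

-- B builds one flat list of 13 timestamps and zips adjacent entries (simpler decomposition); same return value.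


-- ===== PORT A =====
def get_LO_PairOf_Time_StartEnd (str_Date : String) : List (String × String) :=
  let lo_Minutes := ["00", "30"]
  (PySem.List.pyRange 1 (6 + 1) 1).foldl (fun lo_Datetime i =>
    let tmp_1 := str_Date ++ " " ++ "0" ++ PySem.Int.toStr i ++ ":" ++ (PySem.List.pyGet? lo_Minutes 0).getD ""
    let tmp_2 := str_Date ++ " " ++ "0" ++ PySem.Int.toStr i ++ ":" ++ (PySem.List.pyGet? lo_Minutes 1).getD ""
    let tmp_3 := str_Date ++ " " ++ "0" ++ PySem.Int.toStr (i + 1) ++ ":" ++ (PySem.List.pyGet? lo_Minutes 0).getD ""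
    lo_Datetime ++ [(tmp_1, tmp_2)] ++ [(tmp_2, tmp_3)]) []

-- ===== PORT B =====
def get_LO_PairOf_Time_StartEnd_alt (str_Date : String) : List (String × String) :=
  let times := (PySem.List.pyRange 1 7 1).foldl (fun acc h =>
    acc ++ [str_Date ++ " 0" ++ PySem.Int.toStr h ++ ":00"]
        ++ [str_Date ++ " 0" ++ PySem.Int.toStr h ++ ":30"]) []
  let times := times ++ [str_Date ++ " 07:00"]
  times.zip (PySem.List.slice times (some 1) none)

-- ===== PRECONDITION & SPEC =====
def Spec_get_LO_PairOf_Time_StartEnd (str_Date : String) (out : List (String × String)) : Prop := out = get_LO_PairOf_Time_StartEnd_alt str_Date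
instance (str_Date : String) (out : List (String × String)) : Decidable (Spec_get_LO_PairOf_Time_StartEnd str_Date out) := by unfold Spec_get_LO_PairOf_Time_StartEnd; infer_instance

-- ===== CLAIM (what is proved, stated in full; the proofs are below) =====
def Claim_equal_get_LO_PairOf_Time_StartEnd : Prop := ∀ (str_Date : String), Dom_get_LO_PairOf_Time_StartEnd str_Date → Spec_get_LO_PairOf_Time_StartEnd str_Date (get_LO_PairOf_Time_StartEnd str_Date)

-- ===== LEMMAS AND PROOFS =====

-- ===== VERDICT (by name: the statement is the Claim_ definition above) =====
theorem get_LO_PairOf_Time_StartEnd_spec : Claim_equal_get_LO_PairOf_Time_StartEnd := by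
  intro s _
  unfold Spec_get_LO_PairOf_Time_StartEnd get_LO_PairOf_Time_StartEnd get_LO_PairOf_Time_StartEnd_alt
  simp [PySem.List.pyRange, PySem.List.pyGet?, PySem.List.pyIdx?, PySem.List.slice,
        PySem.Int.toStr, String.append_assoc, List.range_succ]
  decide
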